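-- pv_equiv track=rewrite | github.com/AlexTuisov/HW2 | HW2_submission/84_submission/ex2.py | deduce_taken_actions
-- ===== SOURCE A (Python) =====
-- def deduce_taken_actions(observations):
--   actions =  [{'police_actions_taken' : 0,'medics_actions_taken' : 0} for i in range(len(observations)-1)]
--   for observation_num in range(len(observations)-1):
--     for row_num in range(len(observations[observation_num])):
--       for cell_num in range(len(observations[observation_num][row_num])):
--         if observations[observation_num][row_num][cell_num] == 'H' and observations[observation_num+1][row_num][cell_num] == 'I':
--           actions[observation_num]['medics_actions_taken'] += 1
--         elif observations[observation_num][row_num][cell_num] == 'S' and observations[observation_num+1][row_num][cell_num] == 'Q':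
--           actions[observation_num]['police_actions_taken'] += 1
--   return actions
-- ===== SOURCE B (Python) =====
-- def deduce_taken_actions(observations):
--     def positions(grid, symbol):
--         return {(r, c) for r, row in enumerate(grid) for c, cell in enumerate(row) if cell == symbol}
--     result = []
--     for prev, nxt in zip(observations, observations[1:]):
--         result.append({'police_actions_taken': len(positions(prev, 'S') & positions(nxt, 'Q')),
--                        'medics_actions_taken': len(positions(prev, 'H') & positions(nxt, 'I'))})
--     return result
-- ===== Notes on version B (the rewrite author's own statement) =====
-- stated objective: alternative
-- what changed: Instead of A's triple index loops that branch on each cell pair and increment per-step counters, B builds coordinate SETS per symbol (positions of 'H'/'S' in the earlier grid, of 'I'/'Q' in the later one, via set comprehensions over enumerate) and obtains each count as the size of a set intersection, assembling the list by iterating zip(observations, observations[1:]).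
import Mathlib
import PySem

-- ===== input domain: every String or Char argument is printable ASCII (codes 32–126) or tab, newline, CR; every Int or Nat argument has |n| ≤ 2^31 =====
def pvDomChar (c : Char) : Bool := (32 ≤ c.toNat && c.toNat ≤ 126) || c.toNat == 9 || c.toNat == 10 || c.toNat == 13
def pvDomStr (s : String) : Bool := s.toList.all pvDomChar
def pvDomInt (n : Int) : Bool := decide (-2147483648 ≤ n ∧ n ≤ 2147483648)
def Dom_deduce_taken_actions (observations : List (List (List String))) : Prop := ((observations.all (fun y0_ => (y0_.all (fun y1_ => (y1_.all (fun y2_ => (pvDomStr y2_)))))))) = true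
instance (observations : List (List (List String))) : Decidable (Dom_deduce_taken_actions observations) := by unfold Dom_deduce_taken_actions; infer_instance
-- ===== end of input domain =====

-- B replaces A's index-branching counters by a set-theoretic computation: per consecutive pair of
-- observations it builds coordinate sets of 'H'/'S' cells in the earlier grid and 'I'/'Q' cells in
-- the later one, and each count is the size of a set intersection (objective: alternative).

-- ===== PORT A =====
def deduce_taken_actions (observations : List (List (List String))) : List (List (String × Int)) :=
  let actions : List (PySem.Dict String Int) :=
    (PySem.List.pyRange 0 (PySem.List.len observations - 1) 1).map
      (fun _ => ((PySem.Dict.empty.insert "police_actions_taken" (0 : Int)).insert "medics_actions_taken" 0))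
  let actions :=
    (PySem.List.pyRange 0 (PySem.List.len observations - 1) 1).foldl (fun actions observation_num =>
      (PySem.List.pyRange 0 (PySem.List.len (PySem.List.pyGetD observations observation_num [])) 1).foldl (fun actions row_num =>
        (PySem.List.pyRange 0 (PySem.List.len (PySem.List.pyGetD (PySem.List.pyGetD observations observation_num []) row_num [])) 1).foldl (fun actions cell_num =>
          if PySem.List.pyGetD (PySem.List.pyGetD (PySem.List.pyGetD observations observation_num []) row_num []) cell_num "" = "H" ∧
             PySem.List.pyGetD (PySem.List.pyGetD (PySem.List.pyGetD observations (observation_num + 1) []) row_num []) cell_num "" = "I" then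
            actions.modify observation_num.toNat (fun d => d.modify "medics_actions_taken" 0 (· + 1))
          else if PySem.List.pyGetD (PySem.List.pyGetD (PySem.List.pyGetD observations observation_num []) row_num []) cell_num "" = "S" ∧
             PySem.List.pyGetD (PySem.List.pyGetD (PySem.List.pyGetD observations (observation_num + 1) []) row_num []) cell_num "" = "Q" then
            actions.modify observation_num.toNat (fun d => d.modify "police_actions_taken" 0 (· + 1))
          else actions)
          actions)
        actions)
      actions
  actions.map (fun d => d.items)

-- ===== PORT B =====
-- Source B's inner helper: the set of coordinates (r, c) at which `grid` holds `symbol`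
-- (a set comprehension over enumerate; the generated coordinates are pairwise distinct).
def pvPositions (grid : List (List String)) (symbol : String) : PySem.Set (Int × Int) :=
  PySem.Set.ofList ((PySem.List.enumerate grid).flatMap (fun p =>
    (PySem.List.enumerate p.2).filterMap (fun q =>
      if q.2 = symbol then some (p.1, q.1) else none)))

def deduce_taken_actions_alt (observations : List (List (List String))) : List (List (String × Int)) :=
  (observations.zip (PySem.List.slice observations (some 1) none)).foldl (fun result pr =>
    result ++ [[("police_actions_taken", PySem.Set.len (PySem.Set.inter (pvPositions pr.1 "S") (pvPositions pr.2 "Q"))),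
                ("medics_actions_taken", PySem.Set.len (PySem.Set.inter (pvPositions pr.1 "H") (pvPositions pr.2 "I")))]])
    []

-- ===== PRECONDITION & SPEC =====
-- Pre_ admits exactly the inputs on which Python A returns normally: A indexes the NEXT observation
-- only under a cell equal to 'H' or 'S' (short-circuit `and`), so it raises IndexError exactly when
-- some 'H'/'S' cell of a grid has no same-position cell in the following observation.
-- (The port above renders those raising reads as pyGetD defaults, so the Lean equivalence happens to
-- hold on all inputs and the proof does not consume Pre_; Pre_ marks exactly where Python A raises.)
def Pre_deduce_taken_actions (observations : List (List (List String))) : Prop :=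
  ∀ p ∈ observations.zip (observations.drop 1),
    ∀ r < p.1.length, ∀ c < (p.1.getD r []).length,
      ((p.1.getD r []).getD c "" = "H" ∨ (p.1.getD r []).getD c "" = "S") →
        r < p.2.length ∧ c < (p.2.getD r []).length
instance (observations : List (List (List String))) : Decidable (Pre_deduce_taken_actions observations) := by
  unfold Pre_deduce_taken_actions; infer_instance

def pvWitness_deduce_taken_actions : List (List (List String)) := [[["H", "S"], ["S"]], [["I", "Q"], ["Q"]]]

def Spec_deduce_taken_actions (observations : List (List (List String))) (out : List (List (String × Int))) : Prop := out = deduce_taken_actions_alt observations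
instance (observations : List (List (List String))) (out : List (List (String × Int))) : Decidable (Spec_deduce_taken_actions observations out) := by unfold Spec_deduce_taken_actions; infer_instance

-- ===== CLAIM (what is proved, stated in full; the proofs are below) =====
def Claim_equal_deduce_taken_actions : Prop := ∀ (observations : List (List (List String))), Dom_deduce_taken_actions observations → Pre_deduce_taken_actions observations → Spec_deduce_taken_actions observations (deduce_taken_actions observations)

-- ===== LEMMAS AND PROOFS =====

-- proof-side helpers
def pvZipExt {α β : Type} (dy : β) : List α → List β → List (α × β)
  | [], _ => []
  | x :: xt, [] => (x, dy) :: pvZipExt dy xt []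
  | x :: xt, y :: yt => (x, y) :: pvZipExt dy xt yt

theorem pv_natfold_zipExt {α β γ : Type} (xs : List α) (ys : List β) (dx : α) (dy : β)
    (g : γ → α → β → γ) (init : γ) :
    (List.range xs.length).foldl (fun acc k => g acc (xs.getD k dx) (ys.getD k dy)) init
      = (pvZipExt dy xs ys).foldl (fun acc p => g acc p.1 p.2) init := by
  induction xs generalizing ys init with
  | nil => simp [pvZipExt]
  | cons x xt ih =>
    have hshift : ∀ (k : Nat), ys.getD (k+1) dy = (ys.drop 1).getD k dy := by
      intro k; cases ys <;> simp
    have hhead : ys.getD 0 dy = (ys.headD dy) := by cases ys <;> simp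
    have hz : pvZipExt dy (x :: xt) ys = (x, ys.headD dy) :: pvZipExt dy xt (ys.drop 1) := by
      cases ys <;> simp [pvZipExt]
    rw [hz]
    simp only [List.length_cons, List.range_succ_eq_map, List.foldl_cons, List.foldl_map]
    simp only [List.getD_cons_zero, List.getD_cons_succ, hhead, hshift]
    exact ih (ys.drop 1) (g init x (ys.headD dy))

theorem pv_intfold_zipExt {α β γ : Type} (xs : List α) (ys : List β) (dx : α) (dy : β)
    (g : γ → α → β → γ) (init : γ) :
    (PySem.List.pyRange 0 (PySem.List.len xs) 1).foldl
        (fun acc j => g acc (PySem.List.pyGetD xs j dx) (PySem.List.pyGetD ys j dy)) init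
      = (pvZipExt dy xs ys).foldl (fun acc p => g acc p.1 p.2) init := by
  rw [PySem.List.pyRange_one, List.foldl_map]
  simp only [PySem.List.len, Int.sub_zero, Int.toNat_natCast, zero_add, PySem.List.pyGetD_natCast]
  exact pv_natfold_zipExt xs ys dx dy g init

def pvStep (d : PySem.Dict String Int) (p : String × String) : PySem.Dict String Int :=
  if p.1 = "H" ∧ p.2 = "I" then d.modify "medics_actions_taken" 0 (· + 1)
  else if p.1 = "S" ∧ p.2 = "Q" then d.modify "police_actions_taken" 0 (· + 1)
  else d

def pvPairList (g g' : List (List String)) : List (String × String) :=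
  (pvZipExt ([] : List String) g g').flatMap (fun q => pvZipExt "" q.1 q.2)

theorem pv_foldl_modify_same {α β : Type} (l : List β) (i : Nat) (f : β → α → α) (a : List α) :
    l.foldl (fun acts x => acts.modify i (f x)) a = a.modify i (fun d => l.foldl (fun d x => f x d) d) := by
  induction l generalizing a with
  | nil => exact (List.modify_id i a).symm
  | cons x xt ih =>
    simp only [List.foldl_cons]
    rw [ih]
    apply List.ext_getElem?
    intro j
    simp [List.getElem?_modify]
    cases h : a[j]? <;> simp [Option.map] <;> split <;> simp

theorem pv_body (cur nxt : List (List String)) (i : Nat) (acts : List (PySem.Dict String Int)) :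
    (PySem.List.pyRange 0 (PySem.List.len cur) 1).foldl (fun acts row_num =>
      (PySem.List.pyRange 0 (PySem.List.len (PySem.List.pyGetD cur row_num [])) 1).foldl (fun acts cell_num =>
        if PySem.List.pyGetD (PySem.List.pyGetD cur row_num []) cell_num "" = "H" ∧
           PySem.List.pyGetD (PySem.List.pyGetD nxt row_num []) cell_num "" = "I" then
          acts.modify i (fun d => d.modify "medics_actions_taken" 0 (· + 1))
        else if PySem.List.pyGetD (PySem.List.pyGetD cur row_num []) cell_num "" = "S" ∧
           PySem.List.pyGetD (PySem.List.pyGetD nxt row_num []) cell_num "" = "Q" then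
          acts.modify i (fun d => d.modify "police_actions_taken" 0 (· + 1))
        else acts)
        acts)
      acts
    = acts.modify i (fun d => (pvPairList cur nxt).foldl pvStep d) := by
  -- step 1: rewrite the cell-level body into a single modify
  have hcell : ∀ (row_num : Int) (acts : List (PySem.Dict String Int)),
      (PySem.List.pyRange 0 (PySem.List.len (PySem.List.pyGetD cur row_num [])) 1).foldl (fun acts cell_num =>
        if PySem.List.pyGetD (PySem.List.pyGetD cur row_num []) cell_num "" = "H" ∧
           PySem.List.pyGetD (PySem.List.pyGetD nxt row_num []) cell_num "" = "I" then
          acts.modify i (fun d => d.modify "medics_actions_taken" 0 (· + 1))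
        else if PySem.List.pyGetD (PySem.List.pyGetD cur row_num []) cell_num "" = "S" ∧
           PySem.List.pyGetD (PySem.List.pyGetD nxt row_num []) cell_num "" = "Q" then
          acts.modify i (fun d => d.modify "police_actions_taken" 0 (· + 1))
        else acts)
        acts
      = acts.modify i (fun d =>
          (PySem.List.pyRange 0 (PySem.List.len (PySem.List.pyGetD cur row_num [])) 1).foldl (fun d cell_num =>
            pvStep d (PySem.List.pyGetD (PySem.List.pyGetD cur row_num []) cell_num "",
                      PySem.List.pyGetD (PySem.List.pyGetD nxt row_num []) cell_num "")) d) := by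
    intro row_num acts
    rw [show (fun (acts : List (PySem.Dict String Int)) (cell_num : Int) =>
        if PySem.List.pyGetD (PySem.List.pyGetD cur row_num []) cell_num "" = "H" ∧
           PySem.List.pyGetD (PySem.List.pyGetD nxt row_num []) cell_num "" = "I" then
          acts.modify i (fun d => d.modify "medics_actions_taken" 0 (· + 1))
        else if PySem.List.pyGetD (PySem.List.pyGetD cur row_num []) cell_num "" = "S" ∧
           PySem.List.pyGetD (PySem.List.pyGetD nxt row_num []) cell_num "" = "Q" then
          acts.modify i (fun d => d.modify "police_actions_taken" 0 (· + 1))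
        else acts)
      = (fun acts cell_num => acts.modify i (fun d =>
          pvStep d (PySem.List.pyGetD (PySem.List.pyGetD cur row_num []) cell_num "",
                    PySem.List.pyGetD (PySem.List.pyGetD nxt row_num []) cell_num ""))) from by
      funext acts cell_num
      simp only [pvStep]
      split_ifs with h1 h2 <;> first | rfl | exact (List.modify_id i acts).symm]
    exact pv_foldl_modify_same _ i _ acts
  rw [show (fun (acts : List (PySem.Dict String Int)) (row_num : Int) =>
      (PySem.List.pyRange 0 (PySem.List.len (PySem.List.pyGetD cur row_num [])) 1).foldl (fun acts cell_num =>
        if PySem.List.pyGetD (PySem.List.pyGetD cur row_num []) cell_num "" = "H" ∧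
           PySem.List.pyGetD (PySem.List.pyGetD nxt row_num []) cell_num "" = "I" then
          acts.modify i (fun d => d.modify "medics_actions_taken" 0 (· + 1))
        else if PySem.List.pyGetD (PySem.List.pyGetD cur row_num []) cell_num "" = "S" ∧
           PySem.List.pyGetD (PySem.List.pyGetD nxt row_num []) cell_num "" = "Q" then
          acts.modify i (fun d => d.modify "police_actions_taken" 0 (· + 1))
        else acts)
        acts)
    = (fun acts row_num => acts.modify i (fun d =>
        (PySem.List.pyRange 0 (PySem.List.len (PySem.List.pyGetD cur row_num [])) 1).foldl (fun d cell_num =>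
          pvStep d (PySem.List.pyGetD (PySem.List.pyGetD cur row_num []) cell_num "",
                    PySem.List.pyGetD (PySem.List.pyGetD nxt row_num []) cell_num "")) d)) from by
    funext acts row_num; exact hcell row_num acts]
  rw [pv_foldl_modify_same]
  congr 1
  funext d
  -- now a pure dict fold: convert both index levels to zipExt folds
  rw [pv_intfold_zipExt cur nxt [] []
    (fun acc row nrow => (PySem.List.pyRange 0 (PySem.List.len row) 1).foldl (fun d cell_num =>
      pvStep d (PySem.List.pyGetD row cell_num "", PySem.List.pyGetD nrow cell_num "")) acc) d]
  have hinner : ∀ (acc : PySem.Dict String Int) (q : List String × List String),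
      (PySem.List.pyRange 0 (PySem.List.len q.1) 1).foldl (fun d cell_num =>
        pvStep d (PySem.List.pyGetD q.1 cell_num "", PySem.List.pyGetD q.2 cell_num "")) acc
      = (pvZipExt "" q.1 q.2).foldl pvStep acc := by
    intro acc q
    exact pv_intfold_zipExt q.1 q.2 "" "" (fun d c nc => pvStep d (c, nc)) acc
  calc (pvZipExt ([] : List String) cur nxt).foldl (fun acc q =>
        (PySem.List.pyRange 0 (PySem.List.len q.1) 1).foldl (fun d cell_num =>
          pvStep d (PySem.List.pyGetD q.1 cell_num "", PySem.List.pyGetD q.2 cell_num "")) acc) d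
      = (pvZipExt ([] : List String) cur nxt).foldl (fun acc q => (pvZipExt "" q.1 q.2).foldl pvStep acc) d := by
        exact PySem.List.foldl_congr_mem _ _ _ _ (fun acc q _ => hinner acc q)
    _ = (pvPairList cur nxt).foldl pvStep d := by
        rw [pvPairList, List.flatMap_def, List.foldl_flatten, List.foldl_map]

def pvInitD : PySem.Dict String Int :=
  (PySem.Dict.empty.insert "police_actions_taken" (0 : Int)).insert "medics_actions_taken" 0

theorem pv_fmr {α : Type} (m : Nat) (F : Nat → α → α) (L : List α) (j : Nat) :
    ((List.range m).foldl (fun acts k => acts.modify k (F k)) L)[j]? =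
      if j < m then (L[j]?).map (F j) else L[j]? := by
  induction m with
  | zero => simp
  | succ n ih =>
    rw [List.range_succ, List.foldl_append]
    simp only [List.foldl_cons, List.foldl_nil]
    rw [List.getElem?_modify]
    by_cases hj : j = n
    · subst hj
      simp [ih]
    · by_cases hlt : j < n
      · simp [ih, hlt, Nat.lt_succ_of_lt hlt, Ne.symm hj]
      · have h2 : ¬ j < n + 1 := by omega
        simp [ih, hlt, h2, Ne.symm hj]

theorem pv_foldl_modify_range_const {α : Type} (m : Nat) (F : Nat → α → α) (d0 : α) :
    (List.range m).foldl (fun acts k => acts.modify k (F k)) ((List.range m).map (fun _ => d0))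
      = (List.range m).map (fun k => F k d0) := by
  apply List.ext_getElem?
  intro j
  rw [pv_fmr]
  by_cases hj : j < m <;> simp [hj]

theorem pv_A_char (observations : List (List (List String))) :
    deduce_taken_actions observations =
      (List.range ((PySem.List.len observations - 1).toNat)).map
        (fun k => ((pvPairList (observations.getD k []) (observations.getD (k+1) [])).foldl pvStep pvInitD).items) := by
  unfold deduce_taken_actions
  rw [show (fun (actions : List (PySem.Dict String Int)) (observation_num : Int) =>
      (PySem.List.pyRange 0 (PySem.List.len (PySem.List.pyGetD observations observation_num [])) 1).foldl (fun actions row_num =>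
        (PySem.List.pyRange 0 (PySem.List.len (PySem.List.pyGetD (PySem.List.pyGetD observations observation_num []) row_num [])) 1).foldl (fun actions cell_num =>
          if PySem.List.pyGetD (PySem.List.pyGetD (PySem.List.pyGetD observations observation_num []) row_num []) cell_num "" = "H" ∧
             PySem.List.pyGetD (PySem.List.pyGetD (PySem.List.pyGetD observations (observation_num + 1) []) row_num []) cell_num "" = "I" then
            actions.modify observation_num.toNat (fun d => d.modify "medics_actions_taken" 0 (· + 1))
          else if PySem.List.pyGetD (PySem.List.pyGetD (PySem.List.pyGetD observations observation_num []) row_num []) cell_num "" = "S" ∧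
             PySem.List.pyGetD (PySem.List.pyGetD (PySem.List.pyGetD observations (observation_num + 1) []) row_num []) cell_num "" = "Q" then
            actions.modify observation_num.toNat (fun d => d.modify "police_actions_taken" 0 (· + 1))
          else actions)
          actions)
        actions)
    = (fun actions observation_num => actions.modify observation_num.toNat
        (fun d => (pvPairList (PySem.List.pyGetD observations observation_num [])
                              (PySem.List.pyGetD observations (observation_num + 1) [])).foldl pvStep d)) from by
    funext actions observation_num
    exact pv_body (PySem.List.pyGetD observations observation_num [])
      (PySem.List.pyGetD observations (observation_num + 1) []) observation_num.toNat actions]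
  dsimp only
  rw [PySem.List.pyRange_one, List.foldl_map, List.map_map]
  have hcast : ∀ (k : Nat), ((k : Int)) + 1 = ((k + 1 : Nat) : Int) := by intro k; push_cast; ring
  simp only [Function.comp_def, zero_add, Int.toNat_natCast, Int.sub_zero, PySem.List.pyGetD_natCast, hcast]
  rw [pv_foldl_modify_range_const]
  rw [List.map_map]
  rfl

theorem pv_range_zip {γ : Type} (observations : List (List (List String))) (f : List (List String) → List (List String) → γ) :
    (List.range ((PySem.List.len observations - 1).toNat)).map
        (fun k => f (observations.getD k []) (observations.getD (k+1) []))
      = (observations.zip (observations.drop 1)).map (fun pr => f pr.1 pr.2) := by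
  have hm : (PySem.List.len observations - 1).toNat = observations.length - 1 := by
    simp [PySem.List.len]
  rw [hm]
  apply List.ext_getElem?
  intro j
  rw [List.getElem?_map, List.getElem?_map]
  by_cases hj : j < observations.length - 1
  · rw [List.getElem?_range (by simpa using hj)]
    have h1 : j < observations.length := by omega
    have h2 : j + 1 < observations.length := by omega
    have hz : j < (observations.zip (observations.drop 1)).length := by
      simp [List.length_zip]; omega
    rw [List.getElem?_eq_getElem hz, List.getElem_zip]
    have hd : (observations.drop 1)[j]'(by simpa using hz) = observations[j+1] := by
      rw [List.getElem_drop]; congr 1; omega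
    simp only [Option.map_some, hd]
    rw [List.getD_eq_getElem _ _ h1, List.getD_eq_getElem _ _ h2]
  · have hz : (observations.zip (observations.drop 1))[j]? = none := by
      rw [List.getElem?_eq_none_iff]
      simp [List.length_zip]; omega
    have hr : (List.range (observations.length - 1))[j]? = none := by
      rw [List.getElem?_eq_none_iff]
      simpa using hj
    rw [hr, hz]
    rfl

theorem pv_dfold (l : List (String × String)) (p m : Int) :
    l.foldl pvStep (PySem.Dict.mk [("police_actions_taken", p), ("medics_actions_taken", m)]) =
      PySem.Dict.mk [("police_actions_taken", p + l.count ("S", "Q")),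
                     ("medics_actions_taken", m + l.count ("H", "I"))] := by
  induction l generalizing p m with
  | nil => simp
  | cons x xt ih =>
    simp only [List.foldl_cons]
    by_cases h1 : x.1 = "H" ∧ x.2 = "I"
    · have hx : x = ("H","I") := Prod.ext h1.1 h1.2
      rw [show pvStep (PySem.Dict.mk [("police_actions_taken", p), ("medics_actions_taken", m)]) x
            = PySem.Dict.mk [("police_actions_taken", p), ("medics_actions_taken", m + 1)] by
        simp [pvStep, h1, PySem.Dict.modify, PySem.Dict.get?, PySem.Dict.getD, PySem.Dict.insert, PySem.Dict.contains]]
      rw [ih]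
      subst hx
      simp
      ring
    · by_cases h2 : x.1 = "S" ∧ x.2 = "Q"
      · have hx : x = ("S","Q") := Prod.ext h2.1 h2.2
        rw [show pvStep (PySem.Dict.mk [("police_actions_taken", p), ("medics_actions_taken", m)]) x
              = PySem.Dict.mk [("police_actions_taken", p + 1), ("medics_actions_taken", m)] by
          simp [pvStep, h2, PySem.Dict.modify, PySem.Dict.get?, PySem.Dict.getD, PySem.Dict.insert, PySem.Dict.contains]]
        rw [ih]
        subst hx
        simp
        ring
      · rw [show pvStep (PySem.Dict.mk [("police_actions_taken", p), ("medics_actions_taken", m)]) x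
              = PySem.Dict.mk [("police_actions_taken", p), ("medics_actions_taken", m)] by
          simp [pvStep, h1, h2]]
        rw [ih]
        have hne1 : x ≠ ("H","I") := by rintro rfl; exact h1 ⟨rfl, rfl⟩
        have hne2 : x ≠ ("S","Q") := by rintro rfl; exact h2 ⟨rfl, rfl⟩
        simp [hne1, hne2]

theorem pv_cellCount (row nrow : List String) (a b : String) (hb : b ≠ "") :
    (pvZipExt "" row nrow).count (a, b) = (row.zip nrow).count (a, b) := by
  induction row generalizing nrow with
  | nil => simp [pvZipExt]
  | cons x xt ih =>
    cases nrow with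
    | nil =>
      have hne : (x, "") ≠ (a, b) := by
        intro h; exact hb (congrArg Prod.snd h).symm
      simp [pvZipExt, hne, ih []]
    | cons y yt =>
      simp [pvZipExt, List.count_cons, ih yt]

theorem pv_rowsCount (g g' : List (List String)) (a b : String) (hb : b ≠ "") :
    (pvPairList g g').count (a, b) = ((g.zip g').flatMap (fun q => q.1.zip q.2)).count (a, b) := by
  induction g generalizing g' with
  | nil => simp [pvPairList, pvZipExt]
  | cons row gt ih =>
    cases g' with
    | nil =>
      simp only [pvPairList, pvZipExt, List.flatMap_cons, List.zip_nil_right, List.flatMap_nil,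
        List.count_append, List.count_nil]
      have h1 : (pvZipExt "" row ([] : List String)).count (a, b) = 0 := by
        rw [pv_cellCount row [] a b hb]; simp
      have h2 := ih []
      simp only [pvPairList] at h2
      simp [h1, h2]
    | cons nr g't =>
      simp only [pvPairList, pvZipExt, List.flatMap_cons, List.zip_cons_cons,
        List.count_append]
      have h2 := ih g't
      simp only [pvPairList] at h2
      rw [pv_cellCount row nr a b hb, h2]

-- ---- B side: coordinate lists behind the position sets ----

def pvRowC (r : Int) (row : List String) (a : String) (t : Int) : List (Int × Int) :=
  (PySem.List.enumerate row t).filterMap (fun q => if q.2 = a then some (r, q.1) else none)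

def pvCoords (g : List (List String)) (a : String) (s : Int) : List (Int × Int) :=
  (PySem.List.enumerate g s).flatMap (fun p => pvRowC p.1 p.2 a 0)

theorem pv_mem_rowC (r : Int) (row : List String) (a : String) (t : Int) (p : Int × Int) :
    p ∈ pvRowC r row a t ↔ p.1 = r ∧ ∃ k : Nat, ∃ h : k < row.length, p.2 = t + k ∧ row[k] = a := by
  simp only [pvRowC, List.mem_filterMap, PySem.List.mem_enumerate_iff]
  constructor
  · rintro ⟨q, ⟨k, hk, rfl⟩, hf⟩
    split_ifs at hf with ha
    · cases hf
      exact ⟨rfl, k, hk, rfl, ha⟩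
  · rintro ⟨h1, k, hk, h2, ha⟩
    refine ⟨(t + k, row[k]), ⟨k, hk, rfl⟩, ?_⟩
    simp only [ha, if_pos, Option.some.injEq]
    rw [Prod.ext_iff]
    exact ⟨h1.symm, h2.symm⟩

theorem pv_mem_coords (g : List (List String)) (a : String) (s : Int) (p : Int × Int) :
    p ∈ pvCoords g a s ↔ ∃ i : Nat, ∃ h : i < g.length, p.1 = s + i ∧
      ∃ k : Nat, ∃ hk : k < g[i].length, p.2 = (k : Int) ∧ g[i][k] = a := by
  simp only [pvCoords, List.mem_flatMap, PySem.List.mem_enumerate_iff]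
  constructor
  · rintro ⟨q, ⟨i, hi, rfl⟩, hm⟩
    rw [pv_mem_rowC] at hm
    obtain ⟨h1, k, hk, h2, ha⟩ := hm
    exact ⟨i, hi, h1, k, hk, by simpa using h2, ha⟩
  · rintro ⟨i, hi, h1, k, hk, h2, ha⟩
    refine ⟨(s + i, g[i]), ⟨i, hi, rfl⟩, ?_⟩
    rw [pv_mem_rowC]
    exact ⟨h1, k, hk, by simpa using h2, ha⟩

theorem pv_rowC_cons (r : Int) (x : String) (row : List String) (a : String) (t : Int) :
    pvRowC r (x :: row) a t = (if x = a then [(r, t)] else []) ++ pvRowC r row a (t + 1) := by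
  simp only [pvRowC, PySem.List.enumerate_cons, List.filterMap_cons]
  split_ifs <;> simp

theorem pv_nodup_rowC (r : Int) (row : List String) (a : String) (t : Int) :
    (pvRowC r row a t).Nodup := by
  induction row generalizing t with
  | nil => simp [pvRowC, PySem.List.enumerate_nil]
  | cons x row ih =>
    rw [pv_rowC_cons]
    split_ifs with ha
    · simp only [List.singleton_append, List.nodup_cons]
      refine ⟨fun hm => ?_, ih (t + 1)⟩
      rw [pv_mem_rowC] at hm
      obtain ⟨-, k, hk, h2, -⟩ := hm
      simp at h2
      omega
    · simpa using ih (t + 1)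

theorem pv_coords_cons (row : List String) (gt : List (List String)) (a : String) (s : Int) :
    pvCoords (row :: gt) a s = pvRowC s row a 0 ++ pvCoords gt a (s + 1) := by
  simp [pvCoords, PySem.List.enumerate_cons]

theorem pv_nodup_coords (g : List (List String)) (a : String) (s : Int) :
    (pvCoords g a s).Nodup := by
  induction g generalizing s with
  | nil => simp [pvCoords, PySem.List.enumerate_nil]
  | cons row gt ih =>
    rw [pv_coords_cons]
    refine List.Nodup.append (pv_nodup_rowC s row a 0) (ih (s + 1)) ?_
    intro p hp hp'
    rw [pv_mem_rowC] at hp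
    rw [pv_mem_coords] at hp'
    obtain ⟨h1, -⟩ := hp
    obtain ⟨i, hi, h1', -⟩ := hp'
    omega

theorem pv_rowCount (row nrow : List String) (r : Int) (a b : String) (t : Nat) :
    (pvRowC r row a (t : Int)).countP
        (fun p => decide (∃ k : Nat, ∃ hk : k < nrow.length, p.2 = (k : Int) ∧ nrow[k] = b))
      = (row.zip (nrow.drop t)).count (a, b) := by
  induction row generalizing t with
  | nil => simp [pvRowC, PySem.List.enumerate_nil]
  | cons x xt ih =>
    rw [pv_rowC_cons, List.countP_append]
    have hcast : ((t : Int)) + 1 = (((t + 1 : Nat)) : Int) := by push_cast; ring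
    rw [hcast, ih (t + 1)]
    by_cases ht : t < nrow.length
    · rw [List.drop_eq_getElem_cons ht, List.zip_cons_cons, List.count_cons]
      have hhit : (∃ k : Nat, ∃ hk : k < nrow.length, ((r, (t:Int)).2 = (k : Int)) ∧ nrow[k] = b)
          ↔ nrow[t] = b := by
        constructor
        · rintro ⟨k, hk, hek, hb⟩
          have : k = t := by simpa using hek.symm
          subst this
          exact hb
        · intro hb
          exact ⟨t, ht, rfl, hb⟩
      by_cases ha : x = a
      · subst ha
        by_cases hb : nrow[t] = b
        · rw [if_pos rfl]
          simp only [List.countP_cons, List.countP_nil]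
          rw [decide_eq_true (hhit.mpr hb)]
          simp [hb]
          omega
        · rw [if_pos rfl]
          simp only [List.countP_cons, List.countP_nil]
          rw [decide_eq_false (fun h => hb (hhit.mp h))]
          simp [hb]
      · have he : ¬ ((x, nrow[t]) = (a, b)) := by simp [Prod.ext_iff, ha]
        simp [ha, he]
    · have h1 : nrow.drop t = [] := by
        rw [List.drop_eq_nil_iff]; omega
      have h2 : nrow.drop (t+1) = [] := by
        rw [List.drop_eq_nil_iff]; omega
      rw [h1, h2]
      simp only [List.zip_nil_right, List.count_nil]
      have hno : ¬ (∃ k : Nat, ∃ hk : k < nrow.length, ((r, (t:Int)).2 = (k : Int)) ∧ nrow[k] = b) := by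
        rintro ⟨k, hk, hek, -⟩
        have : k = t := by simpa using hek.symm
        omega
      split_ifs
      · simp only [List.countP_cons, List.countP_nil]
        rw [decide_eq_false hno]
        simp
      · simp

theorem pv_countCoords (g g' : List (List String)) (a b : String) (s : Nat) :
    (pvCoords g a (s : Int)).countP (fun p => decide (p ∈ pvCoords g' b 0))
      = ((g.zip (g'.drop s)).flatMap (fun q => q.1.zip q.2)).count (a, b) := by
  induction g generalizing s with
  | nil => simp [pvCoords, PySem.List.enumerate_nil]
  | cons row gt ih =>
    rw [pv_coords_cons, List.countP_append]
    have hcast : ((s : Int)) + 1 = (((s + 1 : Nat)) : Int) := by push_cast; ring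
    rw [hcast, ih (s + 1)]
    by_cases hs : s < g'.length
    · obtain ⟨nrow, hnrow⟩ : ∃ x, g'[s] = x := ⟨_, rfl⟩
      have hcongr : ∀ p ∈ pvRowC (s : Int) row a 0,
          (decide (p ∈ pvCoords g' b 0))
            = (decide (∃ k : Nat, ∃ hk : k < nrow.length, p.2 = (k : Int) ∧ nrow[k] = b)) := by
        intro p hp
        rw [pv_mem_rowC] at hp
        apply decide_eq_decide.mpr
        rw [pv_mem_coords]
        constructor
        · rintro ⟨i, hi, h1, hk⟩
          have hi' : i = s := by
            have := hp.1
            omega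
          subst hi'
          exact hnrow ▸ hk
        · intro hk
          exact ⟨s, hs, by simp [hp.1], hnrow.symm ▸ hk⟩
      rw [List.countP_congr (fun x hx => by rw [hcongr x hx])]
      have h0 : (pvRowC (s : Int) row a ((0 : Nat) : Int)).countP
          (fun p => decide (∃ k : Nat, ∃ hk : k < nrow.length, p.2 = (k : Int) ∧ nrow[k] = b))
          = (row.zip (nrow.drop 0)).count (a, b) := pv_rowCount row nrow (s : Int) a b 0
      simp only [Nat.cast_zero, List.drop_zero] at h0
      rw [h0, List.drop_eq_getElem_cons hs, hnrow, List.zip_cons_cons, List.flatMap_cons, List.count_append]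
    · have h1 : g'.drop s = [] := by rw [List.drop_eq_nil_iff]; omega
      have h2 : g'.drop (s+1) = [] := by rw [List.drop_eq_nil_iff]; omega
      rw [h1]
      rw [h2] at *
      simp only [List.zip_nil_right, List.flatMap_nil, List.count_nil]
      have hz : (pvRowC (s : Int) row a 0).countP (fun p => decide (p ∈ pvCoords g' b 0)) = 0 := by
        rw [List.countP_eq_zero]
        intro p hp
        rw [pv_mem_rowC] at hp
        simp only [decide_eq_true_eq]
        rintro hm
        rw [pv_mem_coords] at hm
        obtain ⟨i, hi, hp1, -⟩ := hm
        have := hp.1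
        omega
      omega

theorem pv_positions_eq (g : List (List String)) (a : String) :
    pvPositions g a = PySem.Set.ofList (pvCoords g a 0) := rfl

theorem pv_interCount (g g' : List (List String)) (a b : String) :
    PySem.Set.len (PySem.Set.inter (pvPositions g a) (pvPositions g' b))
      = (((g.zip g').flatMap (fun q => q.1.zip q.2)).count (a, b) : Int) := by
  rw [pv_positions_eq, pv_positions_eq,
    PySem.Set.ofList_eq_self_of_nodup _ (pv_nodup_coords g a 0),
    PySem.Set.ofList_eq_self_of_nodup _ (pv_nodup_coords g' b 0)]
  simp only [PySem.Set.len, PySem.Set.inter]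
  have hc : (pvCoords g a 0).filter (fun x => PySem.Set.contains (pvCoords g' b 0) x)
      = (pvCoords g a 0).filter (fun x => decide (x ∈ pvCoords g' b 0)) := by
    apply List.filter_congr
    intro x hx
    simp
  rw [hc, ← List.countP_eq_length_filter]
  have h0 := pv_countCoords g g' a b 0
  simp only [Nat.cast_zero, List.drop_zero] at h0
  rw [h0]

theorem pv_B_char (observations : List (List (List String))) :
    deduce_taken_actions_alt observations =
      (observations.zip (observations.drop 1)).map
        (fun pr => [("police_actions_taken", (((pr.1.zip pr.2).flatMap (fun q => q.1.zip q.2)).count ("S", "Q") : Int)),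
                    ("medics_actions_taken", (((pr.1.zip pr.2).flatMap (fun q => q.1.zip q.2)).count ("H", "I") : Int))]) := by
  unfold deduce_taken_actions_alt
  rw [PySem.List.slice_from observations (by norm_num : (0:Int) ≤ 1)]
  rw [PySem.List.foldl_congr_mem _ _
    (fun result pr => result ++ [[("police_actions_taken",
        (((pr.1.zip pr.2).flatMap (fun q => q.1.zip q.2)).count ("S", "Q") : Int)),
      ("medics_actions_taken",
        (((pr.1.zip pr.2).flatMap (fun q => q.1.zip q.2)).count ("H", "I") : Int))]])
    _ (fun acc pr _ => by rw [pv_interCount pr.1 pr.2 "S" "Q", pv_interCount pr.1 pr.2 "H" "I"])]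
  rw [PySem.List.foldl_append_singleton_eq_map]
  simp

theorem pv_final (observations : List (List (List String))) :
    deduce_taken_actions observations = deduce_taken_actions_alt observations := by
  rw [pv_A_char, pv_B_char,
    pv_range_zip observations (fun g g' => ((pvPairList g g').foldl pvStep pvInitD).items)]
  apply List.map_congr_left
  intro pr _
  have hinit : pvInitD = PySem.Dict.mk [("police_actions_taken", (0:Int)), ("medics_actions_taken", (0:Int))] := by
    decide
  rw [hinit, pv_dfold]
  rw [pv_rowsCount pr.1 pr.2 "S" "Q" (by decide), pv_rowsCount pr.1 pr.2 "H" "I" (by decide)]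
  simp

-- ===== VERDICT (by name: the statement is the Claim_ definition above) =====
theorem deduce_taken_actions_spec : Claim_equal_deduce_taken_actions := by
  intro observations _ _
  exact pv_final observations
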